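-- pv_equiv track=rewrite | github.com/a2aproject/a2a-tck | spec_tracker/report_generator.py | _format_test_impacts
-- ===== SOURCE A (Python) =====
-- from typing import Dict, Any, List
--
-- def _format_test_impacts(test_impacts: Dict) -> List[str]:
--     """Format test impact analysis section."""
--     impacts = []
--
--     # Check if there are any impacts
--     total_impacts = sum(len(test_list) for test_list in test_impacts.values())
--     if total_impacts == 0:
--         impacts.append("\n*No test impacts detected.*")
--         return impacts
--
--     # Directly affected tests
--     directly_affected = test_impacts.get('directly_affected', [])
--     if directly_affected:
--         impacts.append(f"\n### Directly Affected Tests ({len(directly_affected)})")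
--         impacts.append("\n*Tests that reference changed specification sections:*")
--         for test_key in directly_affected[:10]:  # Limit to first 10
--             test_name = test_key.split('::')[-1] if '::' in test_key else test_key
--             test_file = test_key.split('::')[0] if '::' in test_key else 'unknown'
--             impacts.append(f"\n- `{test_name}` in `{test_file}`")
--         if len(directly_affected) > 10:
--             impacts.append(f"\n- ... and {len(directly_affected) - 10} more")
--
--     # New coverage needed
--     new_coverage = test_impacts.get('new_coverage_needed', [])
--     if new_coverage:
--         impacts.append(f"\n### New Test Coverage Needed ({len(new_coverage)})")
--         impacts.append("\n*New requirements or features that may need test coverage:*")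
--         for test_key in new_coverage[:10]:  # Limit to first 10
--             test_name = test_key.split('::')[-1] if '::' in test_key else test_key
--             test_file = test_key.split('::')[0] if '::' in test_key else 'unknown'
--             impacts.append(f"\n- `{test_name}` in `{test_file}`")
--         if len(new_coverage) > 10:
--             impacts.append(f"\n- ... and {len(new_coverage) - 10} more")
--
--     # Obsolete tests
--     obsolete_tests = test_impacts.get('obsolete_tests', [])
--     if obsolete_tests:
--         impacts.append(f"\n### Potentially Obsolete Tests ({len(obsolete_tests)})")
--         impacts.append("\n*Tests that may be testing removed requirements:*")
--         for test_key in obsolete_tests[:10]:  # Limit to first 10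
--             test_name = test_key.split('::')[-1] if '::' in test_key else test_key
--             test_file = test_key.split('::')[0] if '::' in test_key else 'unknown'
--             impacts.append(f"\n- `{test_name}` in `{test_file}`")
--         if len(obsolete_tests) > 10:
--             impacts.append(f"\n- ... and {len(obsolete_tests) - 10} more")
--
--     # Possibly affected tests
--     possibly_affected = test_impacts.get('possibly_affected', [])
--     if possibly_affected:
--         impacts.append(f"\n### Possibly Affected Tests ({len(possibly_affected)})")
--         impacts.append("\n*Tests in the same category as changes that may need review:*")
--         for test_key in possibly_affected[:5]:  # Limit to first 5
--             test_name = test_key.split('::')[-1] if '::' in test_key else test_key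
--             test_file = test_key.split('::')[0] if '::' in test_key else 'unknown'
--             impacts.append(f"\n- `{test_name}` in `{test_file}`")
--         if len(possibly_affected) > 5:
--             impacts.append(f"\n- ... and {len(possibly_affected) - 5} more")
--
--     return impacts
-- ===== SOURCE B (Python) =====
-- from typing import Dict, List
--
-- _SECTIONS = [
--     ('directly_affected', 'Directly Affected Tests',
--      'Tests that reference changed specification sections:', 10),
--     ('new_coverage_needed', 'New Test Coverage Needed',
--      'New requirements or features that may need test coverage:', 10),
--     ('obsolete_tests', 'Potentially Obsolete Tests',
--      'Tests that may be testing removed requirements:', 10),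
--     ('possibly_affected', 'Possibly Affected Tests',
--      'Tests in the same category as changes that may need review:', 5),
-- ]
--
--
-- def _items(tests: List[str], remaining: int) -> List[str]:
--     """Recursively emit one bullet per test, counting the limit down; when the
--     counter runs out with tests left, emit the single overflow line instead."""
--     if not tests:
--         return []
--     if remaining == 0:
--         return [f"\n- ... and {len(tests)} more"]
--     head = tests[0]
--     if '::' in head:
--         parts = head.split('::')
--         name, file = parts[-1], parts[0]
--     else:
--         name, file = head, 'unknown'
--     return [f"\n- `{name}` in `{file}`"] + _items(tests[1:], remaining - 1)
--
--
-- def _sections(test_impacts: Dict, cfgs) -> List[str]: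
--     """Recursively render the remaining sections."""
--     if not cfgs:
--         return []
--     key, title, desc, limit = cfgs[0]
--     rest = _sections(test_impacts, cfgs[1:])
--     tests = test_impacts.get(key, [])
--     if not tests:
--         return rest
--     return ([f"\n### {title} ({len(tests)})", f"\n*{desc}*"]
--             + _items(tests, limit) + rest)
--
--
-- def _format_test_impacts(test_impacts: Dict) -> List[str]:
--     """Format test impact analysis section."""
--     if not any(test_impacts.values()):
--         return ["\n*No test impacts detected.*"]
--     return _sections(test_impacts, _SECTIONS)
-- ===== Notes on version B (the rewrite author's own statement) =====
-- stated objective: alternative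
-- what changed: Replaces A's four copy-pasted slice-then-length-check blocks with two recursions: a recursive dispatcher over a section-config list and a countdown recursion over each test list that emits bullets until the limit counter runs out and then emits the overflow line (no slicing, no len>limit comparison); the empty check uses any() over the values instead of summing lengths.
import Mathlib
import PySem

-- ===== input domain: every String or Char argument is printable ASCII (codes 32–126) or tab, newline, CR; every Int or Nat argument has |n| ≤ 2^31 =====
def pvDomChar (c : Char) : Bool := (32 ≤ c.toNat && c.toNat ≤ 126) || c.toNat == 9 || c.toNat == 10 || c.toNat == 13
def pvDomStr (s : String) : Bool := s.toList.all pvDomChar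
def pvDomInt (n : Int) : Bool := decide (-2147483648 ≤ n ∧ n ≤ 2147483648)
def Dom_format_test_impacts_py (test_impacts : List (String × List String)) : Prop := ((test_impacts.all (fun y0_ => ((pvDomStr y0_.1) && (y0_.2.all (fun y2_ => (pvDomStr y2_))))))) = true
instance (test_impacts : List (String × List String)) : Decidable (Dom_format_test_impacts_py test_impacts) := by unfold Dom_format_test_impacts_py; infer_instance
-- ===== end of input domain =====

-- B replaces A's four copy-pasted slice-and-check blocks with recursion: a recursive section dispatcher and a countdown recursion over the tests that emits the overflow line when the limit runs out (no slicing, no length comparison); objective: alternative decomposition, same cost.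


-- ===== PORT A =====
-- Literal transliteration of _format_test_impacts: four unrolled section blocks,
-- each appending to `impacts` with a foldl over the sliced list.
def format_test_impacts_py (test_impacts : List (String × List String)) : List String :=
  let d := PySem.Dict.mk test_impacts
  let impacts : List String := []
  let total_impacts : Int := (d.values.map (fun test_list => (test_list.length : Int))).sum
  if total_impacts = 0 then impacts ++ ["\n*No test impacts detected.*"]
  else
    let directly_affected := d.getD "directly_affected" []
    let impacts :=
      if directly_affected ≠ [] then
        let impacts := impacts ++ ["\n### Directly Affected Tests (" ++ PySem.Int.toStr (directly_affected.length : Int) ++ ")"]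
        let impacts := impacts ++ ["\n*Tests that reference changed specification sections:*"]
        let impacts := (PySem.List.slice directly_affected none (some 10)).foldl
          (fun acc test_key =>
            let test_name := if PySem.Str.isIn "::" test_key then PySem.List.pyGetD ((PySem.Str.split? test_key "::").getD []) (-1) "" else test_key
            let test_file := if PySem.Str.isIn "::" test_key then PySem.List.pyGetD ((PySem.Str.split? test_key "::").getD []) 0 "" else "unknown"
            acc ++ ["\n- `" ++ test_name ++ "` in `" ++ test_file ++ "`"]) impacts
        if (directly_affected.length : Int) > 10 then
          impacts ++ ["\n- ... and " ++ PySem.Int.toStr ((directly_affected.length : Int) - 10) ++ " more"]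
        else impacts
      else impacts
    let new_coverage := d.getD "new_coverage_needed" []
    let impacts :=
      if new_coverage ≠ [] then
        let impacts := impacts ++ ["\n### New Test Coverage Needed (" ++ PySem.Int.toStr (new_coverage.length : Int) ++ ")"]
        let impacts := impacts ++ ["\n*New requirements or features that may need test coverage:*"]
        let impacts := (PySem.List.slice new_coverage none (some 10)).foldl
          (fun acc test_key =>
            let test_name := if PySem.Str.isIn "::" test_key then PySem.List.pyGetD ((PySem.Str.split? test_key "::").getD []) (-1) "" else test_key
            let test_file := if PySem.Str.isIn "::" test_key then PySem.List.pyGetD ((PySem.Str.split? test_key "::").getD []) 0 "" else "unknown"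
            acc ++ ["\n- `" ++ test_name ++ "` in `" ++ test_file ++ "`"]) impacts
        if (new_coverage.length : Int) > 10 then
          impacts ++ ["\n- ... and " ++ PySem.Int.toStr ((new_coverage.length : Int) - 10) ++ " more"]
        else impacts
      else impacts
    let obsolete_tests := d.getD "obsolete_tests" []
    let impacts :=
      if obsolete_tests ≠ [] then
        let impacts := impacts ++ ["\n### Potentially Obsolete Tests (" ++ PySem.Int.toStr (obsolete_tests.length : Int) ++ ")"]
        let impacts := impacts ++ ["\n*Tests that may be testing removed requirements:*"]
        let impacts := (PySem.List.slice obsolete_tests none (some 10)).foldl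
          (fun acc test_key =>
            let test_name := if PySem.Str.isIn "::" test_key then PySem.List.pyGetD ((PySem.Str.split? test_key "::").getD []) (-1) "" else test_key
            let test_file := if PySem.Str.isIn "::" test_key then PySem.List.pyGetD ((PySem.Str.split? test_key "::").getD []) 0 "" else "unknown"
            acc ++ ["\n- `" ++ test_name ++ "` in `" ++ test_file ++ "`"]) impacts
        if (obsolete_tests.length : Int) > 10 then
          impacts ++ ["\n- ... and " ++ PySem.Int.toStr ((obsolete_tests.length : Int) - 10) ++ " more"]
        else impacts
      else impacts
    let possibly_affected := d.getD "possibly_affected" []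
    let impacts :=
      if possibly_affected ≠ [] then
        let impacts := impacts ++ ["\n### Possibly Affected Tests (" ++ PySem.Int.toStr (possibly_affected.length : Int) ++ ")"]
        let impacts := impacts ++ ["\n*Tests in the same category as changes that may need review:*"]
        let impacts := (PySem.List.slice possibly_affected none (some 5)).foldl
          (fun acc test_key =>
            let test_name := if PySem.Str.isIn "::" test_key then PySem.List.pyGetD ((PySem.Str.split? test_key "::").getD []) (-1) "" else test_key
            let test_file := if PySem.Str.isIn "::" test_key then PySem.List.pyGetD ((PySem.Str.split? test_key "::").getD []) 0 "" else "unknown"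
            acc ++ ["\n- `" ++ test_name ++ "` in `" ++ test_file ++ "`"]) impacts
        if (possibly_affected.length : Int) > 5 then
          impacts ++ ["\n- ... and " ++ PySem.Int.toStr ((possibly_affected.length : Int) - 5) ++ " more"]
        else impacts
      else impacts
    impacts

-- ===== PORT B =====
-- body of _items' per-test bullet (name/file from splitting on '::', else 'unknown')
def pvFmtLine (test_key : String) : String :=
  let nf : String × String :=
    if PySem.Str.isIn "::" test_key then
      let parts := (PySem.Str.split? test_key "::").getD []
      (PySem.List.pyGetD parts (-1) "", PySem.List.pyGetD parts 0 "")
    else (test_key, "unknown")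
  "\n- `" ++ nf.1 ++ "` in `" ++ nf.2 ++ "`"

-- _items: countdown recursion; overflow line when the counter hits 0 with tests left
def pvItems (tests : List String) (remaining : Int) : List String :=
  match tests with
  | [] => []
  | t :: rest =>
    if remaining = 0 then
      ["\n- ... and " ++ PySem.Int.toStr ((t :: rest).length : Int) ++ " more"]
    else pvFmtLine t :: pvItems rest (remaining - 1)

-- _SECTIONS
def pvSectionsCfg : List (String × String × String × Int) :=
  [("directly_affected", "Directly Affected Tests", "Tests that reference changed specification sections:", 10),
   ("new_coverage_needed", "New Test Coverage Needed", "New requirements or features that may need test coverage:", 10),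
   ("obsolete_tests", "Potentially Obsolete Tests", "Tests that may be testing removed requirements:", 10),
   ("possibly_affected", "Possibly Affected Tests", "Tests in the same category as changes that may need review:", 5)]

-- _sections: recursion over the remaining configs
def pvSections (d : PySem.Dict String (List String)) : List (String × String × String × Int) → List String
  | [] => []
  | cfg :: cs =>
    let rest := pvSections d cs
    let tests := d.getD cfg.1 []
    if tests = [] then rest
    else
      ("\n### " ++ cfg.2.1 ++ " (" ++ PySem.Int.toStr (tests.length : Int) ++ ")") ::
      ("\n*" ++ cfg.2.2.1 ++ "*") :: (pvItems tests cfg.2.2.2 ++ rest)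

def format_test_impacts_py_alt (test_impacts : List (String × List String)) : List String :=
  let d := PySem.Dict.mk test_impacts
  if (d.values.any (fun l => !l.isEmpty)) = false then ["\n*No test impacts detected.*"]
  else pvSections d pvSectionsCfg

-- ===== PRECONDITION & SPEC =====
def Spec_format_test_impacts_py (test_impacts : List (String × List String)) (out : List String) : Prop := out = format_test_impacts_py_alt test_impacts
instance (test_impacts : List (String × List String)) (out : List String) : Decidable (Spec_format_test_impacts_py test_impacts out) := by unfold Spec_format_test_impacts_py; infer_instance

-- ===== CLAIM (what is proved, stated in full; the proofs are below) =====
def Claim_equal_format_test_impacts_py : Prop := ∀ (test_impacts : List (String × List String)), Dom_format_test_impacts_py test_impacts → Spec_format_test_impacts_py test_impacts (format_test_impacts_py test_impacts)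

-- ===== LEMMAS AND PROOFS =====

-- A's sum-of-lengths test agrees with B's any-nonempty test
theorem pvTotal_eq (vs : List (List String)) :
    ((vs.map (fun l => (l.length : Int))).sum = 0) ↔ (vs.any (fun l => !l.isEmpty) = false) := by
  induction vs with
  | nil => simp
  | cons v vs ih =>
    simp only [List.map_cons, List.sum_cons, List.any_cons, Bool.or_eq_false_iff, ← ih]
    have h0 : (0 : Int) ≤ ((vs.map (fun l => (l.length : Int))).sum) := by
      apply List.sum_nonneg; intro x hx
      simp only [List.mem_map] at hx; obtain ⟨l, _, rfl⟩ := hx; positivity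
    cases v <;> simp <;> omega

-- B's shared line formatter equals A's inline per-item expression
theorem pvFmtLine_eq (test_key : String) :
    pvFmtLine test_key =
      "\n- `" ++ (if PySem.Str.isIn "::" test_key then PySem.List.pyGetD ((PySem.Str.split? test_key "::").getD []) (-1) "" else test_key)
      ++ "` in `" ++ (if PySem.Str.isIn "::" test_key then PySem.List.pyGetD ((PySem.Str.split? test_key "::").getD []) 0 "" else "unknown") ++ "`" := by
  by_cases h : PySem.Str.isIn "::" test_key = true
  · simp only [pvFmtLine, h, if_true]
  · rw [Bool.not_eq_true] at h
    simp only [pvFmtLine, h, Bool.false_eq_true, if_false]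

-- B's countdown recursion equals A's slice-map plus overflow check
theorem pvItems_eq (tests : List String) (lim : Int) (hlim : 0 ≤ lim) :
    pvItems tests lim =
      (PySem.List.slice tests none (some lim)).map pvFmtLine ++
      (if (tests.length : Int) > lim then
        ["\n- ... and " ++ PySem.Int.toStr ((tests.length : Int) - lim) ++ " more"]
      else []) := by
  induction tests generalizing lim with
  | nil =>
    rw [PySem.List.slice_to _ hlim]
    simp only [pvItems, List.take_nil, List.map_nil, List.nil_append, List.length_nil]
    rw [if_neg (by omega)]
  | cons t rest ih =>
    by_cases h0 : lim = 0
    · subst h0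
      rw [PySem.List.slice_to _ le_rfl]
      simp [pvItems]
    · have h1 : (1 : Int) ≤ lim := by omega
      rw [PySem.List.slice_to _ hlim]
      simp only [pvItems, if_neg h0]
      rw [ih (lim - 1) (by omega), PySem.List.slice_to _ (by omega)]
      have htake : (t :: rest).take lim.toNat = t :: rest.take (lim - 1).toNat := by
        have : lim.toNat = (lim - 1).toNat + 1 := by omega
        rw [this, List.take_succ_cons]
      rw [htake]
      simp only [List.map_cons, List.cons_append, List.length_cons]
      have hlen : ((rest.length + 1 : Nat) : Int) > lim ↔ (rest.length : Int) > lim - 1 := by push_cast; omega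
      by_cases hmore : (rest.length : Int) > lim - 1
      · rw [if_pos hmore, if_pos (by push_cast; omega)]
        have : ((rest.length + 1 : Nat) : Int) - lim = (rest.length : Int) - (lim - 1) := by push_cast; omega
        rw [this]
      · rw [if_neg hmore, if_neg (by push_cast; omega)]

-- 'impacts if nonempty else impacts ++ tail' pushed into an appended if
theorem pvIfAppend {P : Prop} [Decidable P] (X : List String) (y : String) :
    (if P then X ++ [y] else X) = X ++ if P then [y] else [] := by
  split <;> simp

-- A's inlined section block, named for the proof (definitionally equal to each of A's four blocks)
def pvABlock (d : PySem.Dict String (List String)) (key title desc : String) (limit : Int)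
    (impacts : List String) : List String :=
  let tests := d.getD key []
  if tests ≠ [] then
    let impacts := impacts ++ ["\n### " ++ title ++ " (" ++ PySem.Int.toStr (tests.length : Int) ++ ")"]
    let impacts := impacts ++ ["\n*" ++ desc ++ "*"]
    let impacts := (PySem.List.slice tests none (some limit)).foldl
      (fun acc test_key =>
        let test_name := if PySem.Str.isIn "::" test_key then PySem.List.pyGetD ((PySem.Str.split? test_key "::").getD []) (-1) "" else test_key
        let test_file := if PySem.Str.isIn "::" test_key then PySem.List.pyGetD ((PySem.Str.split? test_key "::").getD []) 0 "" else "unknown"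
        acc ++ ["\n- `" ++ test_name ++ "` in `" ++ test_file ++ "`"]) impacts
    if (tests.length : Int) > limit then
      impacts ++ ["\n- ... and " ++ PySem.Int.toStr ((tests.length : Int) - limit) ++ " more"]
    else impacts
  else impacts

-- A's whole body, written as the chain of the four named blocks (definitional)
theorem pvA_eq (ti : List (String × List String)) :
    format_test_impacts_py ti =
      (if (((PySem.Dict.mk ti).values.map (fun test_list => (test_list.length : Int))).sum) = 0 then
        ["\n*No test impacts detected.*"]
      else
        pvABlock (PySem.Dict.mk ti) "possibly_affected" "Possibly Affected Tests" "Tests in the same category as changes that may need review:" 5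
          (pvABlock (PySem.Dict.mk ti) "obsolete_tests" "Potentially Obsolete Tests" "Tests that may be testing removed requirements:" 10
            (pvABlock (PySem.Dict.mk ti) "new_coverage_needed" "New Test Coverage Needed" "New requirements or features that may need test coverage:" 10
              (pvABlock (PySem.Dict.mk ti) "directly_affected" "Directly Affected Tests" "Tests that reference changed specification sections:" 10 [])))) := rfl

-- one section's contribution, as pvSections emits it
def pvChunk (d : PySem.Dict String (List String)) (cfg : String × String × String × Int) : List String :=
  let tests := d.getD cfg.1 []
  if tests = [] then []
  else
    ("\n### " ++ cfg.2.1 ++ " (" ++ PySem.Int.toStr (tests.length : Int) ++ ")") ::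
    ("\n*" ++ cfg.2.2.1 ++ "*") :: pvItems tests cfg.2.2.2

theorem pvSections_cons (d : PySem.Dict String (List String)) (cfg : String × String × String × Int)
    (cs : List (String × String × String × Int)) :
    pvSections d (cfg :: cs) = pvChunk d cfg ++ pvSections d cs := by
  by_cases h : d.getD cfg.1 [] = []
  · simp [pvSections, pvChunk, h]
  · simp [pvSections, pvChunk, h]

-- each A block appends exactly one of B's section chunks
theorem pvBlock_eq (d : PySem.Dict String (List String)) (key title desc : String) (limit : Int)
    (hlim : 0 ≤ limit) (impacts : List String) :
    pvABlock d key title desc limit impacts = impacts ++ pvChunk d (key, title, desc, limit) := by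
  by_cases h : d.getD key [] = []
  · simp [pvABlock, pvChunk, h]
  · simp only [pvABlock, pvChunk, h, ne_eq, not_false_eq_true, if_true, if_false,
      PySem.List.foldl_append_singleton_eq_map, pvIfAppend]
    rw [pvItems_eq _ _ hlim]
    simp [pvFmtLine_eq]

-- ===== VERDICT (by name: the statement is the Claim_ definition above) =====
theorem format_test_impacts_py_spec : Claim_equal_format_test_impacts_py := by
  intro ti _
  unfold Spec_format_test_impacts_py
  rw [pvA_eq]
  unfold format_test_impacts_py_alt
  by_cases h : (((PySem.Dict.mk ti).values.map (fun test_list => (test_list.length : Int))).sum) = 0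
  · rw [if_pos h, if_pos (by rw [← pvTotal_eq]; exact h)]
  · rw [if_neg h, if_neg (by rw [← pvTotal_eq]; exact h)]
    rw [pvBlock_eq _ _ _ _ _ (by norm_num), pvBlock_eq _ _ _ _ _ (by norm_num),
        pvBlock_eq _ _ _ _ _ (by norm_num), pvBlock_eq _ _ _ _ _ (by norm_num)]
    rw [show pvSectionsCfg = _ :: _ :: _ :: _ :: ([] : List (String × String × String × Int)) from rfl]
    rw [pvSections_cons, pvSections_cons, pvSections_cons, pvSections_cons]
    simp [pvSections, List.append_assoc]
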